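-- pv_equiv track=rewrite | github.com/Clayton-Adamson/Python-projects | euler26/euler26.py | long_division
-- ===== SOURCE A (Python) =====
-- def long_division(num,denom):
--     dec_expansion = ""
--     while(len(dec_expansion) < 3001):
--
--         if(denom > num):
--             dec_expansion += "0"
--             num *= 10
--
--         dec_expansion += str(num//denom)
--         remainder = num - (num//denom)*denom
--         num = remainder * 10
--
--     return dec_expansion
-- ===== SOURCE B (Python) =====
-- def long_division(num, denom):
--     # Long division with cycle detection: record each loop-top state `num` and the
--     # substring it emits; on the first repeated state, replay the recorded cycle
--     # instead of re-dividing.  Same output as the direct loop, including the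
--     # check-before-append stop boundary (possible overshoot past 3001 chars).
--     seen = {}
--     chunks = []
--     total = 0
--     state = num
--     while total < 3001 and state not in seen:
--         seen[state] = len(chunks)
--         if denom > state:
--             work = state * 10
--             chunk = "0" + str(work // denom)
--         else:
--             work = state
--             chunk = str(work // denom)
--         chunks.append(chunk)
--         total += len(chunk)
--         state = (work - (work // denom) * denom) * 10
--     out = "".join(chunks)
--     if total < 3001:
--         start = seen[state]
--         j = start
--         while len(out) < 3001:
--             out += chunks[j]
--             j += 1
--             if j == len(chunks):
--                 j = start
--     return out
-- ===== Notes on version B (the rewrite author's own statement) =====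
-- stated objective: alternative
-- what changed: B runs the long division once per distinct remainder state, recording each state and its emitted substring in a dict, and on the first repeated state replays the recorded pre-cycle/cycle chunks instead of dividing again, preserving A's check-before-append stop boundary.
import Mathlib
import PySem

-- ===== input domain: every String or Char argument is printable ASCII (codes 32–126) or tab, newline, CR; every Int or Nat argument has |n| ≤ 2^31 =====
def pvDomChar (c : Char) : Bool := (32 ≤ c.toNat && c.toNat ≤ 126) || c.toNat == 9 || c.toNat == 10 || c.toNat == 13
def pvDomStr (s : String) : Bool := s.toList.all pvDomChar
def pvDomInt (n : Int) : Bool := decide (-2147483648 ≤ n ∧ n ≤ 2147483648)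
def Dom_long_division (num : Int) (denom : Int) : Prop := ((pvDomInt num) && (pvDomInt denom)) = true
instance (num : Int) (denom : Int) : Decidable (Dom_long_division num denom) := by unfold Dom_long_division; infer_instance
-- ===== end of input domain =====

-- B replaces A's one-division-per-output-step loop by long division with cycle detection
-- (dict of seen remainder states + replay of the recorded chunks); equal return value on denom ≠ 0.

-- termination helper for the ports (cited in decreasing_by): str(n) is never empty
theorem pv_toDigitsCore_len (b : Nat) : ∀ (fuel n : Nat) (lst : List Char),
    lst.length ≤ (Nat.toDigitsCore b fuel n lst).length := by
  intro fuel
  induction fuel with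
  | zero => intro n lst; simp [Nat.toDigitsCore]
  | succ f ih =>
    intro n lst
    rw [Nat.toDigitsCore]
    split
    · simp
    · exact le_trans (by simp) (ih _ _)

theorem pv_toChars_len (n : Int) : 1 ≤ (PySem.Int.toChars n).length := by
  unfold PySem.Int.toChars
  split
  · simp only [List.length_cons]; omega
  · rw [Nat.toDigits, Nat.toDigitsCore]
    split
    · simp
    · exact le_trans (by simp) (pv_toDigitsCore_len _ _ _ _)

-- ===== PORT A =====
-- while len(dec_expansion) < 3001: if denom > num: append "0", num *= 10;
-- append str(num//denom); num = (num - (num//denom)*denom) * 10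
def loopA (denom : Int) (acc : List Char) (num : Int) : List Char :=
  if h : acc.length < 3001 then
    loopA denom
      ((if denom > num then acc ++ ['0'] else acc) ++
        PySem.Int.toChars (PySem.Int.floordiv (if denom > num then num * 10 else num) denom))
      (((if denom > num then num * 10 else num) -
        PySem.Int.floordiv (if denom > num then num * 10 else num) denom * denom) * 10)
  else acc
termination_by (3001 - acc.length : Nat)
decreasing_by
  have h1 := pv_toChars_len (PySem.Int.floordiv (if denom > num then num * 10 else num) denom)
  by_cases hd : denom > num <;> simp [hd, List.length_append] at * <;> omega

def long_division (num : Int) (denom : Int) : String :=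
  String.ofList (loopA denom [] num)

-- ===== PORT B =====
-- phase 1: long division recording each loop-top state in `seen` and its emitted chunk
def loopB1 (denom : Int) (seen : PySem.Dict Int Nat) (chunks : List (List Char))
    (total : Int) (state : Int) : PySem.Dict Int Nat × List (List Char) × Int × Int :=
  if h : total < 3001 ∧ seen.contains state = false then
    loopB1 denom (seen.insert state chunks.length)
      (chunks ++ [(if denom > state then ['0'] else []) ++
        PySem.Int.toChars (PySem.Int.floordiv (if denom > state then state * 10 else state) denom)])
      (total + (((if denom > state then ['0'] else []) ++
        PySem.Int.toChars (PySem.Int.floordiv (if denom > state then state * 10 else state) denom)).length : Int))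
      (((if denom > state then state * 10 else state) -
        PySem.Int.floordiv (if denom > state then state * 10 else state) denom * denom) * 10)
  else (seen, chunks, total, state)
termination_by (3001 - total).toNat
decreasing_by
  have h1 := pv_toChars_len (PySem.Int.floordiv (if denom > state then state * 10 else state) denom)
  have h2 := h.1
  by_cases hd : denom > state <;> simp [hd] at * <;> omega

-- phase 2: replay the recorded cycle chunks[start:] until the length bound is reached.
-- chunks[j] is ported as List.getD (j is always in range); the fuel 3001 only makes the
-- recursion structural — it is never exhausted, since every chunk is nonempty.
def loopB2 (chunks : List (List Char)) (start : Nat) : Nat → List Char → Nat → List Char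
  | 0, out, _ => out
  | fuel + 1, out, j =>
    if out.length < 3001 then
      loopB2 chunks start fuel (out ++ chunks.getD j [])
        (if j + 1 = chunks.length then start else j + 1)
    else out

def long_division_alt (num : Int) (denom : Int) : String :=
  let r := loopB1 denom PySem.Dict.empty [] 0 num
  if r.2.2.1 < 3001 then
    String.ofList (loopB2 r.2.1 (r.1.getD r.2.2.2 0) 3001 r.2.1.flatten (r.1.getD r.2.2.2 0))
  else
    String.ofList r.2.1.flatten

-- ===== PRECONDITION & SPEC =====
-- denom = 0 makes Python's `num // denom` raise ZeroDivisionError (in A and in B alike)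
def Pre_long_division (num : Int) (denom : Int) : Prop := denom ≠ 0
instance (num : Int) (denom : Int) : Decidable (Pre_long_division num denom) := by
  unfold Pre_long_division; infer_instance

def pvWitness_long_division : Int × Int := (1, 7)

def Spec_long_division (num : Int) (denom : Int) (out : String) : Prop := out = long_division_alt num denom
instance (num : Int) (denom : Int) (out : String) : Decidable (Spec_long_division num denom out) := by unfold Spec_long_division; infer_instance

-- ===== CLAIM (what is proved, stated in full; the proofs are below) =====
def Claim_equal_long_division : Prop := ∀ (num : Int) (denom : Int), Dom_long_division num denom → Pre_long_division num denom → Spec_long_division num denom (long_division num denom)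

-- ===== LEMMAS AND PROOFS =====

-- the per-iteration emitted chunk and successor state of the division loop
def pvChunk (denom s : Int) : List Char :=
  (if denom > s then ['0'] else []) ++
    PySem.Int.toChars (PySem.Int.floordiv (if denom > s then s * 10 else s) denom)

def pvNext (denom s : Int) : Int :=
  ((if denom > s then s * 10 else s) -
    PySem.Int.floordiv (if denom > s then s * 10 else s) denom * denom) * 10

theorem pv_chunk_len (denom s : Int) : 1 ≤ (pvChunk denom s).length := by
  unfold pvChunk
  have := pv_toChars_len (PySem.Int.floordiv (if denom > s then s * 10 else s) denom)
  simp only [List.length_append]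
  omega

-- reference semantics: the text still emitted from state s once `len` chars exist
def pvTail (denom : Int) (len : Nat) (s : Int) : List Char :=
  if len < 3001 then
    pvChunk denom s ++ pvTail denom (len + (pvChunk denom s).length) (pvNext denom s)
  else []
termination_by (3001 - len : Nat)
decreasing_by
  have := pv_chunk_len denom s
  omega

-- the sequence of loop-top states
def pvS (denom num : Int) : Nat → Int
  | 0 => num
  | k + 1 => pvNext denom (pvS denom num k)

theorem loopA_eq (denom : Int) : ∀ (n : Nat) (acc : List Char) (num : Int),
    3001 - acc.length ≤ n → loopA denom acc num = acc ++ pvTail denom acc.length num := by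
  intro n
  induction n with
  | zero =>
    intro acc num hb
    have h : ¬ acc.length < 3001 := by omega
    rw [loopA.eq_def, dif_neg h, pvTail.eq_def, if_neg h]
    simp
  | succ n ih =>
    intro acc num hb
    by_cases h : acc.length < 3001
    · rw [loopA.eq_def, dif_pos h]
      have hacc : ((if denom > num then acc ++ ['0'] else acc) ++
          PySem.Int.toChars (PySem.Int.floordiv (if denom > num then num * 10 else num) denom))
          = acc ++ pvChunk denom num := by
        unfold pvChunk; split <;> simp
      have hnum : (((if denom > num then num * 10 else num) -
          PySem.Int.floordiv (if denom > num then num * 10 else num) denom * denom) * 10)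
          = pvNext denom num := rfl
      rw [hacc, hnum, ih (acc ++ pvChunk denom num) (pvNext denom num)
        (by have := pv_chunk_len denom num; simp only [List.length_append]; omega)]
      conv_rhs => rw [pvTail.eq_def]
      rw [if_pos h]
      simp [List.append_assoc]
    · rw [loopA.eq_def, dif_neg h, pvTail.eq_def, if_neg h]
      simp

theorem B_replay (denom num : Int) (chunks : List (List Char)) (m i : Nat)
    (hm : chunks.length = m)
    (hc : ∀ k, k < m → chunks.getD k [] = pvChunk denom (pvS denom num k))
    (hw : pvS denom num m = pvS denom num i) (him : i < m) :
    ∀ (fuel : Nat) (out : List Char) (j : Nat), i ≤ j → j < m → 3001 - out.length ≤ fuel →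
      loopB2 chunks i fuel out j = out ++ pvTail denom out.length (pvS denom num j) := by
  intro fuel
  induction fuel with
  | zero =>
    intro out j _ _ hf
    have h : ¬ out.length < 3001 := by omega
    simp only [loopB2]
    rw [pvTail.eq_def, if_neg h]
    simp
  | succ fuel ih =>
    intro out j hij hjm hf
    by_cases h : out.length < 3001
    · simp only [loopB2]
      rw [if_pos h, hc j hjm]
      rw [pvTail.eq_def, if_pos h]
      have hnext : pvNext denom (pvS denom num j) = pvS denom num (j + 1) := rfl
      have hlen := pv_chunk_len denom (pvS denom num j)
      by_cases hj : j + 1 = chunks.length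
      · rw [if_pos hj]
        have hw' : pvS denom num (j + 1) = pvS denom num i := by
          rw [hj, hm]; exact hw
        rw [ih (out ++ pvChunk denom (pvS denom num j)) i (le_refl i) him
          (by simp only [List.length_append]; omega)]
        rw [hnext, hw']
        simp [List.append_assoc]
      · rw [if_neg hj]
        have hj1 : j + 1 < m := by omega
        rw [ih (out ++ pvChunk denom (pvS denom num j)) (j + 1) (by omega) hj1
          (by simp only [List.length_append]; omega)]
        rw [hnext]
        simp [List.append_assoc]
    · simp only [loopB2]
      rw [if_neg h, pvTail.eq_def, if_neg h]
      simp

theorem B_loop (denom num : Int) : ∀ (n : Nat) (seen : PySem.Dict Int Nat)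
    (chunks : List (List Char)) (total : Int) (state : Int) (m : Nat),
    (3001 - total).toNat ≤ n →
    state = pvS denom num m →
    chunks = (List.range m).map (fun k => pvChunk denom (pvS denom num k)) →
    total = (chunks.flatten.length : Int) →
    (∀ k, k < m → seen.get? (pvS denom num k) = some k) →
    (∀ x, seen.contains x = true → ∃ k, k < m ∧ x = pvS denom num k) →
    ∃ m',
      (loopB1 denom seen chunks total state).2.2.2 = pvS denom num m' ∧
      (loopB1 denom seen chunks total state).2.1
        = (List.range m').map (fun k => pvChunk denom (pvS denom num k)) ∧
      (loopB1 denom seen chunks total state).2.2.1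
        = ((loopB1 denom seen chunks total state).2.1.flatten.length : Int) ∧
      (∀ k, k < m' → (loopB1 denom seen chunks total state).1.get? (pvS denom num k) = some k) ∧
      (∀ x, (loopB1 denom seen chunks total state).1.contains x = true →
        ∃ k, k < m' ∧ x = pvS denom num k) ∧
      ((loopB1 denom seen chunks total state).2.2.1 < 3001 →
        (loopB1 denom seen chunks total state).1.contains
          (loopB1 denom seen chunks total state).2.2.2 = true) ∧
      chunks.flatten ++ pvTail denom chunks.flatten.length state
        = (loopB1 denom seen chunks total state).2.1.flatten ++
          pvTail denom (loopB1 denom seen chunks total state).2.1.flatten.length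
            (loopB1 denom seen chunks total state).2.2.2 := by
  intro n
  induction n with
  | zero =>
    intro seen chunks total state m hb h1 h2 h3 h4 h5
    have hge : ¬ total < 3001 := by omega
    have hcond : ¬ (total < 3001 ∧ seen.contains state = false) := by tauto
    rw [loopB1.eq_def, dif_neg hcond]
    exact ⟨m, h1, h2, h3, h4, h5, by intro hlt; exact absurd hlt hge, rfl⟩
  | succ n ih =>
    intro seen chunks total state m hb h1 h2 h3 h4 h5
    by_cases hcond : total < 3001 ∧ seen.contains state = false
    · rw [loopB1.eq_def, dif_pos hcond]
      have htl := hcond.1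
      have hmlen : chunks.length = m := by rw [h2]; simp
      have hchunk : ((if denom > state then ['0'] else []) ++
          PySem.Int.toChars (PySem.Int.floordiv (if denom > state then state * 10 else state) denom))
          = pvChunk denom state := rfl
      have hnext : (((if denom > state then state * 10 else state) -
          PySem.Int.floordiv (if denom > state then state * 10 else state) denom * denom) * 10)
          = pvNext denom state := rfl
      have hclen := pv_chunk_len denom state
      obtain ⟨m', hr⟩ := ih (seen.insert state chunks.length)
        (chunks ++ [(if denom > state then ['0'] else []) ++
          PySem.Int.toChars (PySem.Int.floordiv (if denom > state then state * 10 else state) denom)])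
        (total + (((if denom > state then ['0'] else []) ++
          PySem.Int.toChars (PySem.Int.floordiv (if denom > state then state * 10 else state) denom)).length : Int))
        ((((if denom > state then state * 10 else state) -
          PySem.Int.floordiv (if denom > state then state * 10 else state) denom * denom) * 10))
        (m + 1)
        (by rw [hchunk]; omega)
        (by rw [hnext, h1]; rfl)
        (by rw [hchunk, h2, List.range_succ, List.map_append]; rw [h1]; simp)
        (by rw [hchunk, h3]; simp [List.flatten_append])
        (by
          intro k hk
          rw [hmlen]
          rcases Nat.lt_succ_iff_lt_or_eq.mp hk with hk' | hk'
          · have hne : pvS denom num k ≠ state := by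
              intro heq
              have hg := h4 k hk'
              have hcont : seen.contains (pvS denom num k) = true := by
                rw [PySem.Dict.contains_eq_isSome_get?, hg]; rfl
              rw [heq, hcond.2] at hcont
              exact Bool.false_ne_true hcont
            rw [PySem.Dict.get?_insert_of_ne seen m hne]
            exact h4 k hk'
          · rw [hk', ← h1]
            exact PySem.Dict.get?_insert_self seen state m)
        (by
          intro x hx
          rw [PySem.Dict.contains_insert] at hx
          rcases Bool.or_eq_true_iff.mp hx with hx' | hx'
          · exact ⟨m, Nat.lt_succ_self m, by rw [← h1]; exact eq_of_beq hx'⟩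
          · obtain ⟨k, hk, hxe⟩ := h5 x hx'
            exact ⟨k, by omega, hxe⟩)
      refine ⟨m', hr.1, hr.2.1, hr.2.2.1, hr.2.2.2.1, hr.2.2.2.2.1, hr.2.2.2.2.2.1, ?_⟩
      have hflt : chunks.flatten.length < 3001 := by
        rw [h3] at htl; exact_mod_cast htl
      have hstep : chunks.flatten ++ pvTail denom chunks.flatten.length state
          = (chunks ++ [(if denom > state then ['0'] else []) ++
              PySem.Int.toChars (PySem.Int.floordiv (if denom > state then state * 10 else state) denom)]).flatten ++
            pvTail denom (chunks ++ [(if denom > state then ['0'] else []) ++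
              PySem.Int.toChars (PySem.Int.floordiv (if denom > state then state * 10 else state) denom)]).flatten.length
            ((((if denom > state then state * 10 else state) -
              PySem.Int.floordiv (if denom > state then state * 10 else state) denom * denom) * 10)) := by
        rw [hchunk, hnext]
        conv_lhs => rw [pvTail.eq_def]
        rw [if_pos hflt]
        simp [List.flatten_append, List.append_assoc]
      rw [hstep]
      exact hr.2.2.2.2.2.2
    · rw [loopB1.eq_def, dif_neg hcond]
      refine ⟨m, h1, h2, h3, h4, h5, ?_, rfl⟩
      intro hlt
      cases hcb : PySem.Dict.contains seen state with
      | false => exact absurd ⟨hlt, hcb⟩ hcond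
      | true => rfl

theorem A_char (num denom : Int) : long_division num denom = String.ofList (pvTail denom 0 num) := by
  unfold long_division
  rw [loopA_eq denom 3001 [] num (by simp)]
  simp

theorem B_char (num denom : Int) :
    long_division_alt num denom = String.ofList (pvTail denom 0 num) := by
  unfold long_division_alt
  obtain ⟨m', h1, h2, h3, h4, h5, hexit, heq⟩ :=
    B_loop denom num 3001 PySem.Dict.empty [] 0 num 0 (by simp) rfl (by simp) (by simp)
      (by intro k hk; omega)
      (by intro x hx; simp [PySem.Dict.contains_eq_isSome_get?] at hx)
  rcases hr : loopB1 denom PySem.Dict.empty [] 0 num with ⟨seen', chunks', total', state'⟩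
  rw [hr] at h1 h2 h3 h4 h5 hexit heq
  simp only at h1 h2 h3 h4 h5 hexit heq
  simp only [List.flatten_nil, List.length_nil, List.nil_append] at heq
  show (if total' < 3001 then
      String.ofList (loopB2 chunks' (seen'.getD state' 0) 3001 chunks'.flatten (seen'.getD state' 0))
    else String.ofList chunks'.flatten) = String.ofList (pvTail denom 0 num)
  by_cases hlt : total' < 3001
  · rw [if_pos hlt]
    have hcont := hexit hlt
    obtain ⟨i, him, hxi⟩ := h5 state' hcont
    have hgd : seen'.getD state' 0 = i := by
      have hd : seen'.getD state' 0 = (seen'.get? state').getD 0 := rfl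
      rw [hd, hxi, h4 i him]
      rfl
    rw [hgd]
    have hmlen : chunks'.length = m' := by rw [h2]; simp
    have hrep := B_replay denom num chunks' m' i hmlen
      (by
        intro k hk
        rw [h2, List.getD_eq_getElem?_getD, List.getElem?_map, List.getElem?_range hk]
        rfl)
      (by rw [← h1, ← hxi]) him 3001 chunks'.flatten i (le_refl i) him (by omega)
    rw [hrep, ← hxi, ← heq]
  · rw [if_neg hlt]
    have hflt : ¬ chunks'.flatten.length < 3001 := by
      intro hc
      apply hlt
      rw [h3]
      exact_mod_cast hc
    rw [heq]
    conv_rhs => rw [pvTail.eq_def]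
    rw [if_neg hflt]
    simp

-- ===== VERDICT (by name: the statement is the Claim_ definition above) =====
theorem long_division_spec : Claim_equal_long_division := by
  intro num denom _hdom _hpre
  unfold Spec_long_division
  rw [A_char, B_char]
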